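-- pv_equiv track=rewrite | github.com/Mestos/Projeto_SistemasD | servidor.py | pos_menor_precedencia
-- ===== SOURCE A (Python) =====
-- def pos_menor_precedencia(expr):
--     operadores_niveis = [
--         ['+', '-'],        # Menor precedência
--         ['*', '/', '//', '%'],
--         ['**']             # Maior precedência
--     ]
--
--     # Função auxiliar para verificar se estamos fora de parênteses
--     def fora_dos_parenteses(i):
--         count = 0
--         for j in range(i):
--             if expr[j] == '(':
--                 count += 1
--             elif expr[j] == ')':
--                 count -= 1
--         return count == 0
--
--     # Procurar do menor para o maior nível de precedência
--     for operadores in operadores_niveis: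
--         i = len(expr) - 1
--         while i >= 0:
--             if not fora_dos_parenteses(i):
--                 i -= 1
--                 continue
--             # Verifica operadores de 2 caracteres (como // e **)
--             if i > 0 and expr[i-1:i+1] in operadores and fora_dos_parenteses(i-1):
--                 return i - 1
--             elif expr[i] in operadores:
--                 return i
--             i -= 1
--     return -1  # Nenhum operador encontrado fora dos parênteses
-- ===== SOURCE B (Python) =====
-- def pos_menor_precedencia(expr):
--     # Single left-to-right pass: maintain running parenthesis depth and,
--     # for each precedence level, the rightmost matching operator position.
--     best = [None, None, None]
--     depth = 0
--     prev0 = False       # was the depth zero just before the previous character?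
--     prev_char = ''
--     for i, c in enumerate(expr):
--         if depth == 0:
--             if c in ('+', '-'):
--                 best[0] = i
--             if i > 0 and prev0 and prev_char + c == '//':
--                 best[1] = i - 1
--             elif c in ('*', '/', '%'):
--                 best[1] = i
--             if i > 0 and prev0 and prev_char + c == '**':
--                 best[2] = i - 1
--         prev0 = depth == 0
--         prev_char = c
--         if c == '(':
--             depth += 1
--         elif c == ')':
--             depth -= 1
--     for b in best:
--         if b is not None:
--             return b
--     return -1
-- ===== Notes on version B (the rewrite author's own statement) =====
-- stated objective: faster
-- what changed: Replaced the per-level right-to-left rescans with an O(n^2) balance recount at every position by one left-to-right pass that maintains the running parenthesis depth and the rightmost candidate for each precedence level.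
import Mathlib
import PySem

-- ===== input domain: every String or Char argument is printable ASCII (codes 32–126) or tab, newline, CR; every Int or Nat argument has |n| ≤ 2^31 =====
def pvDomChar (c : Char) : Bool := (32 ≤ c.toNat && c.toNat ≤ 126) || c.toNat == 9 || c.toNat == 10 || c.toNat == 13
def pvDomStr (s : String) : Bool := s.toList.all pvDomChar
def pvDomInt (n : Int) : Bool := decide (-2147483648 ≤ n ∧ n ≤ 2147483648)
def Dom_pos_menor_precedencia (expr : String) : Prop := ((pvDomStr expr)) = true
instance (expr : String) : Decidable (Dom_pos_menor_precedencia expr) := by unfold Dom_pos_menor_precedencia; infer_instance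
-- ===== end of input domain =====

-- B replaces A's per-level right-to-left rescans (each with an O(n) balance recount) by
-- one left-to-right pass keeping the running depth and the rightmost candidate per level.

-- ===== PORT A =====
-- operator levels, as lists of char-lists (Python strings compared exactly)
def pvLevel0 : List (List Char) := [['+'], ['-']]
def pvLevel1 : List (List Char) := [['*'], ['/'], ['/', '/'], ['%']]
def pvLevel2 : List (List Char) := [['*', '*']]

-- fora_dos_parenteses: count over expr[j] for j in range(i) (exact: the first i chars)
def pvFora (cs : List Char) (i : Nat) : Bool :=
  ((cs.take i).foldl
    (fun count ch => if ch = '(' then count + 1 else if ch = ')' then count - 1 else count)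
    (0 : Int)) == 0

-- the inner 'while i >= 0' loop of A, argument n = i + 1 (n = 0 means i has gone below 0)
def pvScanA (cs : List Char) (ops : List (List Char)) : Nat → Option Int
  | 0 => none
  | n + 1 =>
    if pvFora cs n = false then pvScanA cs ops n
    else if 0 < n ∧ ((cs.drop (n - 1)).take 2) ∈ ops ∧ pvFora cs (n - 1) = true then
      some ((n : Int) - 1)
    else if [cs.getD n ' '] ∈ ops then some (n : Int)
    else pvScanA cs ops n

-- the outer 'for operadores in operadores_niveis' loop with its early returns
def pvLevelsA (cs : List Char) : List (List (List Char)) → Option Int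
  | [] => none
  | ops :: rest =>
    match pvScanA cs ops cs.length with
    | some r => some r
    | none => pvLevelsA cs rest

def pos_menor_precedencia (expr : String) : Int :=
  (pvLevelsA expr.toList [pvLevel0, pvLevel1, pvLevel2]).getD (-1)

-- ===== PORT B =====
structure PvStB where
  depth : Int
  prev0 : Bool
  prevc : Char
  b0 : Option Int
  b1 : Option Int
  b2 : Option Int
  deriving Repr, DecidableEq

def pvInit : PvStB := ⟨0, false, ' ', none, none, none⟩

def pvStepB (st : PvStB) (p : Int × Char) : PvStB :=
  let i := p.1
  let c := p.2
  let st1 :=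
    if st.depth = 0 then
      let b0 := if c = '+' ∨ c = '-' then some i else st.b0
      let b1 :=
        if 0 < i ∧ st.prev0 = true ∧ st.prevc = '/' ∧ c = '/' then some (i - 1)
        else if c = '*' ∨ c = '/' ∨ c = '%' then some i
        else st.b1
      let b2 :=
        if 0 < i ∧ st.prev0 = true ∧ st.prevc = '*' ∧ c = '*' then some (i - 1)
        else st.b2
      { st with b0 := b0, b1 := b1, b2 := b2 }
    else st
  let st2 := { st1 with prev0 := st.depth = 0, prevc := c }
  if c = '(' then { st2 with depth := st2.depth + 1 }
  else if c = ')' then { st2 with depth := st2.depth - 1 }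
  else st2

def pos_menor_precedencia_alt (expr : String) : Int :=
  let st := (PySem.List.enumerate expr.toList 0).foldl pvStepB pvInit
  match st.b0 with
  | some b => b
  | none =>
    match st.b1 with
    | some b => b
    | none =>
      match st.b2 with
      | some b => b
      | none => -1

-- ===== PRECONDITION & SPEC =====
def Spec_pos_menor_precedencia (expr : String) (out : Int) : Prop := out = pos_menor_precedencia_alt expr
instance (expr : String) (out : Int) : Decidable (Spec_pos_menor_precedencia expr out) := by unfold Spec_pos_menor_precedencia; infer_instance

-- ===== CLAIM (what is proved, stated in full; the proofs are below) =====
def Claim_equal_pos_menor_precedencia : Prop := ∀ (expr : String), Dom_pos_menor_precedencia expr → Spec_pos_menor_precedencia expr (pos_menor_precedencia expr)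

-- ===== LEMMAS AND PROOFS =====

-- the state of B's fold after the first n characters
def pvFoldN (cs : List Char) (n : Nat) : PvStB :=
  ((PySem.List.enumerate cs 0).take n).foldl pvStepB pvInit

-- the signed balance of the first n characters (pvFora cs n = (pvBal cs n == 0))
def pvBal (cs : List Char) (n : Nat) : Int :=
  (cs.take n).foldl
    (fun count ch => if ch = '(' then count + 1 else if ch = ')' then count - 1 else count)
    (0 : Int)

lemma pvFora_eq (cs : List Char) (n : Nat) : pvFora cs n = (pvBal cs n == 0) := rfl

-- per-field characterization of B's step
lemma pvStepB_depth (st : PvStB) (i : Int) (c : Char) :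
    (pvStepB st (i, c)).depth =
      if c = '(' then st.depth + 1 else if c = ')' then st.depth - 1 else st.depth := by
  simp only [pvStepB]; split_ifs <;> rfl

lemma pvStepB_prev0 (st : PvStB) (i : Int) (c : Char) :
    (pvStepB st (i, c)).prev0 = decide (st.depth = 0) := by
  simp only [pvStepB]; split_ifs <;> rfl

lemma pvStepB_prevc (st : PvStB) (i : Int) (c : Char) :
    (pvStepB st (i, c)).prevc = c := by
  simp only [pvStepB]; split_ifs <;> rfl

lemma pvStepB_b0 (st : PvStB) (i : Int) (c : Char) :
    (pvStepB st (i, c)).b0 =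
      if st.depth = 0 then (if c = '+' ∨ c = '-' then some i else st.b0) else st.b0 := by
  simp only [pvStepB]; split_ifs <;> rfl

lemma pvStepB_b1 (st : PvStB) (i : Int) (c : Char) :
    (pvStepB st (i, c)).b1 =
      if st.depth = 0 then
        (if 0 < i ∧ st.prev0 = true ∧ st.prevc = '/' ∧ c = '/' then some (i - 1)
         else if c = '*' ∨ c = '/' ∨ c = '%' then some i
         else st.b1)
      else st.b1 := by
  simp only [pvStepB]; split_ifs <;> rfl

lemma pvStepB_b2 (st : PvStB) (i : Int) (c : Char) :
    (pvStepB st (i, c)).b2 =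
      if st.depth = 0 then
        (if 0 < i ∧ st.prev0 = true ∧ st.prevc = '*' ∧ c = '*' then some (i - 1)
         else st.b2)
      else st.b2 := by
  simp only [pvStepB]; split_ifs <;> rfl

-- one scan step of A
lemma pvScanA_succ_skip (cs : List Char) (ops : List (List Char)) (n : Nat)
    (h : pvFora cs n = false) : pvScanA cs ops (n + 1) = pvScanA cs ops n := by
  simp [pvScanA, h]

lemma pvScanA_succ_hit (cs : List Char) (ops : List (List Char)) (n : Nat)
    (h : pvFora cs n = true) :
    pvScanA cs ops (n + 1) =
      if 0 < n ∧ ((cs.drop (n - 1)).take 2) ∈ ops ∧ pvFora cs (n - 1) = true then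
        some ((n : Int) - 1)
      else if [cs.getD n ' '] ∈ ops then some ((n : Int))
      else pvScanA cs ops n := by
  simp [pvScanA, h]

lemma pvGetD_eq (cs : List Char) (n : Nat) (h : n < cs.length) : cs.getD n ' ' = cs[n] := by
  simp [List.getD_eq_getElem?_getD, List.getElem?_eq_getElem h]

lemma pvBal_succ (cs : List Char) (n : Nat) (h : n < cs.length) :
    pvBal cs (n + 1) =
      (if cs.getD n ' ' = '(' then pvBal cs n + 1
       else if cs.getD n ' ' = ')' then pvBal cs n - 1 else pvBal cs n) := by
  unfold pvBal
  rw [List.take_add_one, List.getElem?_eq_getElem h, pvGetD_eq cs n h, Option.toList_some,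
    List.foldl_append]
  rfl

lemma pvDropTakeTwo (cs : List Char) (n : Nat) (h1 : 1 ≤ n) (h2 : n < cs.length) :
    (cs.drop (n - 1)).take 2 = [cs.getD (n - 1) ' ', cs.getD n ' '] := by
  have hn1 : n - 1 < cs.length := by omega
  rw [List.drop_eq_getElem_cons hn1, show n - 1 + 1 = n from by omega,
    List.drop_eq_getElem_cons h2, pvGetD_eq cs (n - 1) hn1, pvGetD_eq cs n h2]
  rfl

lemma pvFoldN_succ (cs : List Char) (n : Nat) (h : n < cs.length) :
    pvFoldN cs (n + 1) = pvStepB (pvFoldN cs n) ((n : Int), cs.getD n ' ') := by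
  unfold pvFoldN
  have he : (PySem.List.enumerate cs 0)[n]? = some ((n : Int), cs.getD n ' ') := by
    rw [PySem.List.getElem?_enumerate, List.getElem?_eq_getElem h, pvGetD_eq cs n h]
    simp
  rw [List.take_add_one, he]
  simp [List.foldl_append]

-- membership in the level lists, reduced to character equations
lemma pvMem0_two (a b : Char) : [a, b] ∉ pvLevel0 := by simp [pvLevel0]
lemma pvMem0_one (c : Char) : [c] ∈ pvLevel0 ↔ (c = '+' ∨ c = '-') := by simp [pvLevel0]
lemma pvMem1_two (a b : Char) : [a, b] ∈ pvLevel1 ↔ (a = '/' ∧ b = '/') := by simp [pvLevel1]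
lemma pvMem1_one (c : Char) : [c] ∈ pvLevel1 ↔ (c = '*' ∨ c = '/' ∨ c = '%') := by
  simp [pvLevel1]
lemma pvMem2_two (a b : Char) : [a, b] ∈ pvLevel2 ↔ (a = '*' ∧ b = '*') := by simp [pvLevel2]
lemma pvMem2_one (c : Char) : [c] ∉ pvLevel2 := by simp [pvLevel2]

-- the invariant tying B's forward fold state to A's scans of the first n characters
lemma pvInvariant (cs : List Char) (n : Nat) (h : n ≤ cs.length) :
    (pvFoldN cs n).depth = pvBal cs n ∧
    (pvFoldN cs n).prev0 = (decide (1 ≤ n) && (pvBal cs (n - 1) == 0)) ∧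
    (1 ≤ n → (pvFoldN cs n).prevc = cs.getD (n - 1) ' ') ∧
    (pvFoldN cs n).b0 = pvScanA cs pvLevel0 n ∧
    (pvFoldN cs n).b1 = pvScanA cs pvLevel1 n ∧
    (pvFoldN cs n).b2 = pvScanA cs pvLevel2 n := by
  induction n with
  | zero => simp [pvFoldN, pvInit, pvScanA, pvBal]
  | succ n ih =>
    have hn : n < cs.length := by omega
    obtain ⟨ihd, ihp0, ihpc, ihb0, ihb1, ihb2⟩ := ih (by omega)
    rw [pvFoldN_succ cs n hn]
    by_cases hbal : pvBal cs n = 0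
    · -- depth before position n is zero: both sides examine index n
      have hdz : (pvFoldN cs n).depth = 0 := by rw [ihd]; exact hbal
      have hfora : pvFora cs n = true := by simp [pvFora_eq, hbal]
      refine ⟨?_, ?_, ?_, ?_, ?_, ?_⟩
      · rw [pvStepB_depth, ihd, pvBal_succ cs n hn]
      · rw [pvStepB_prev0, ihd]
        simp [hbal]
      · intro _
        rw [pvStepB_prevc]
        simp
      · -- level 0 candidate
        rw [pvStepB_b0, if_pos hdz, ihb0, pvScanA_succ_hit cs pvLevel0 n hfora]
        have h2 : ¬ (0 < n ∧ ((cs.drop (n - 1)).take 2) ∈ pvLevel0 ∧ pvFora cs (n - 1) = true) := by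
          rintro ⟨hpos, hm, -⟩
          rw [pvDropTakeTwo cs n hpos hn] at hm
          exact pvMem0_two _ _ hm
        rw [if_neg h2]
        by_cases hch : cs.getD n ' ' = '+' ∨ cs.getD n ' ' = '-'
        · rw [if_pos hch, if_pos ((pvMem0_one _).2 hch)]
        · rw [if_neg hch, if_neg (fun hm => hch ((pvMem0_one _).1 hm))]
      · -- level 1 candidate
        rw [pvStepB_b1, if_pos hdz, ihb1, pvScanA_succ_hit cs pvLevel1 n hfora]
        by_cases hpos : 1 ≤ n
        · have hpc := ihpc hpos
          have hp : (pvFoldN cs n).prev0 = pvFora cs (n - 1) := by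
            rw [ihp0, pvFora_eq]; simp [hpos]
          have hzi : (0 : Int) < (n : Int) := by exact_mod_cast hpos
          have hpos' : 0 < n := hpos
          rw [pvDropTakeTwo cs n hpos hn]
          simp only [pvMem1_two, pvMem1_one, hpc, hp]
          split_ifs <;> first | rfl | tauto
        · have hn0 : n = 0 := by omega
          subst hn0
          have hz : ¬ ((0 : Nat) < 0) := by omega
          have hzi : ¬ ((0 : Int) < ((0 : Nat) : Int)) := by norm_num
          simp only [pvMem1_one]
          split_ifs <;> first | rfl | tauto
      · -- level 2 candidate
        rw [pvStepB_b2, if_pos hdz, ihb2, pvScanA_succ_hit cs pvLevel2 n hfora]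
        have hm1 : ¬ ([cs.getD n ' '] ∈ pvLevel2) := pvMem2_one _
        by_cases hpos : 1 ≤ n
        · have hpc := ihpc hpos
          have hp : (pvFoldN cs n).prev0 = pvFora cs (n - 1) := by
            rw [ihp0, pvFora_eq]; simp [hpos]
          have hzi : (0 : Int) < (n : Int) := by exact_mod_cast hpos
          have hpos' : 0 < n := hpos
          rw [pvDropTakeTwo cs n hpos hn]
          simp only [pvMem2_two, hpc, hp]
          split_ifs <;> first | rfl | tauto
        · have hn0 : n = 0 := by omega
          subst hn0
          have hz : ¬ ((0 : Nat) < 0) := by omega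
          have hzi : ¬ ((0 : Int) < ((0 : Nat) : Int)) := by norm_num
          split_ifs <;> first | rfl | tauto
    · -- depth nonzero: the step keeps the candidates, the scan skips index n
      have hdz : ¬ (pvFoldN cs n).depth = 0 := by rw [ihd]; exact hbal
      have hfora : pvFora cs n = false := by simp [pvFora_eq, hbal]
      refine ⟨?_, ?_, ?_, ?_, ?_, ?_⟩
      · rw [pvStepB_depth, ihd, pvBal_succ cs n hn]
      · rw [pvStepB_prev0, ihd]
        simp [hbal]
      · intro _
        rw [pvStepB_prevc]
        simp
      · rw [pvStepB_b0, if_neg hdz, ihb0, pvScanA_succ_skip cs pvLevel0 n hfora]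
      · rw [pvStepB_b1, if_neg hdz, ihb1, pvScanA_succ_skip cs pvLevel1 n hfora]
      · rw [pvStepB_b2, if_neg hdz, ihb2, pvScanA_succ_skip cs pvLevel2 n hfora]

-- ===== VERDICT (by name: the statement is the Claim_ definition above) =====
theorem pos_menor_precedencia_spec : Claim_equal_pos_menor_precedencia := by
  intro expr _
  unfold Spec_pos_menor_precedencia
  simp only [pos_menor_precedencia, pos_menor_precedencia_alt]
  set cs := expr.toList with hcs
  have hfull : (PySem.List.enumerate cs 0).foldl pvStepB pvInit = pvFoldN cs cs.length := by
    unfold pvFoldN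
    rw [show cs.length = (PySem.List.enumerate cs 0).length by simp [PySem.List.length_enumerate],
      List.take_length]
  rw [hfull]
  obtain ⟨-, -, -, hb0, hb1, hb2⟩ := pvInvariant cs cs.length (le_refl _)
  rw [hb0, hb1, hb2]
  unfold pvLevelsA
  cases pvScanA cs pvLevel0 cs.length with
  | some r => simp
  | none =>
    simp only
    unfold pvLevelsA
    cases pvScanA cs pvLevel1 cs.length with
    | some r => simp
    | none =>
      simp only
      unfold pvLevelsA
      cases pvScanA cs pvLevel2 cs.length with
      | some r => simp
      | none => simp [pvLevelsA]
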